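-- pv_equiv track=rewrite | github.com/cancerit/VaLiAnT | src/valiant/sgrna_utils.py | get_sgrna_ids
-- ===== SOURCE A (Python) =====
-- from typing import Dict, FrozenSet, List, Optional, Set
--
-- def get_codon_index_range(codon_start: int, codon_end: int) -> List[int]:
--     return (
--         [codon_start] if codon_end == codon_start else
--         list(range(codon_start, codon_end + 1))
--     )
--
-- def get_sgrna_ids(frame: int, codon_to_sgrna_ids: Dict[int, str], mut_pos: int, mut_ref: Optional[str]) -> Set[str]:
--     """List the identifiers of the sgRNA's whose variants map to codons altered by the mutation"""
--
--     def _get_codon_index(x: int) -> int: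
--         # Assuming the positions are relative indices
--         return get_codon_index(frame, 0, x)
--
--     codon_start: int = _get_codon_index(mut_pos)
--     ref_length: int = len(mut_ref) if mut_ref else 0
--
--     return (
--         {
--             codon_to_sgrna_ids[codon_index]
--             for codon_index in get_codon_index_range(codon_start, _get_codon_index(mut_pos + ref_length - 1))
--             if codon_index in codon_to_sgrna_ids
--         } if ref_length > 1 else
--         {codon_to_sgrna_ids[codon_start]} if codon_start in codon_to_sgrna_ids else
--         set()
--     )
--
-- def get_codon_index(seq_frame: int, seq_start: int, x: int) -> int:
--     return (x + seq_frame - seq_start) // 3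
-- ===== SOURCE B (Python) =====
-- def get_sgrna_ids(frame, codon_to_sgrna_ids, mut_pos, mut_ref):
--     """List the identifiers of the sgRNA's whose variants map to codons altered by the mutation"""
--     codon_start = (mut_pos + frame) // 3
--     ref_length = len(mut_ref) if mut_ref else 0
--     codon_end = codon_start if ref_length <= 1 else (mut_pos + ref_length - 1 + frame) // 3
--     result = set()
--     for codon_index in sorted(k for k in codon_to_sgrna_ids if codon_start <= k <= codon_end):
--         result.add(codon_to_sgrna_ids[codon_index])
--     return result
-- ===== Notes on version B (the rewrite author's own statement) =====
-- stated objective: alternative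
-- what changed: B inverts the traversal: instead of A's branch chain that builds an explicit codon-index range list and looks each index up in the dict (plus separate singleton/empty branches), B computes a codon interval [codon_start, codon_end], scans the dict's keys once, keeps those inside the interval, sorts them and collects the corresponding ids in one unified pass.
import Mathlib
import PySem

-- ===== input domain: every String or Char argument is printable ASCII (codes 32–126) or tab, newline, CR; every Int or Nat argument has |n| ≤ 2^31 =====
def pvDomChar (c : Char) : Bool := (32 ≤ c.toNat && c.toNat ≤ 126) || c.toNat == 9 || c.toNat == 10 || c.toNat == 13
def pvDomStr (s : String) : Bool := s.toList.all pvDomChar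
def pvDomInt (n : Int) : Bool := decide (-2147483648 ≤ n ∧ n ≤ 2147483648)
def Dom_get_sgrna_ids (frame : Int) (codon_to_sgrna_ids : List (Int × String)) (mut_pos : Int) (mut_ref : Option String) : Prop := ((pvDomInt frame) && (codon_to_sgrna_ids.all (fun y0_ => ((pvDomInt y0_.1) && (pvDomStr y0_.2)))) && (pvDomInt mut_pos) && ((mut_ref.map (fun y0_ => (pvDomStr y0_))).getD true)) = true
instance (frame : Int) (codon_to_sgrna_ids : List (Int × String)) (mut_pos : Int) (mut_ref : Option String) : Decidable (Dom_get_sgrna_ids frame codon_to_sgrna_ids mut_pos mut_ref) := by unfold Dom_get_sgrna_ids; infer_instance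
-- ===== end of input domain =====

-- B replaces A's enumerate-the-codon-range-and-look-up strategy by a scan of the dict's keys
-- filtered to the codon interval and sorted (objective: simpler — one unified collection pass,
-- no index-range builder and no separate singleton/empty branches). Return value only (a set).

-- ===== PORT A =====
def pv_get_codon_index (seq_frame seq_start x : Int) : Int :=
  PySem.Int.floordiv (x + seq_frame - seq_start) 3

def pv_get_codon_index_range (codon_start codon_end : Int) : List Int :=
  if codon_end = codon_start then [codon_start]
  else PySem.List.pyRange codon_start (codon_end + 1)

def get_sgrna_ids (frame : Int) (codon_to_sgrna_ids : List (Int × String)) (mut_pos : Int) (mut_ref : Option String) : List String :=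
  let d : PySem.Dict Int String := PySem.Dict.mk codon_to_sgrna_ids
  let codon_start : Int := pv_get_codon_index frame 0 mut_pos
  -- len(mut_ref) if mut_ref else 0  (None and "" are falsy)
  let ref_length : Int := match mut_ref with
    | some s => if s = "" then 0 else PySem.Str.len s
    | none => 0
  if ref_length > 1 then
    -- set comprehension: fold Set.add over the range, 'in'-guard + subscript ported as get?
    (pv_get_codon_index_range codon_start (pv_get_codon_index frame 0 (mut_pos + ref_length - 1))).foldl
      (fun acc codon_index =>
        match PySem.Dict.get? d codon_index with
        | some v => PySem.Set.add acc v
        | none => acc) PySem.Set.empty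
  else
    -- {d[codon_start]} if codon_start in d else set()  ('in'-guard + subscript = get?)
    match PySem.Dict.get? d codon_start with
    | some v => PySem.Set.add PySem.Set.empty v
    | none => PySem.Set.empty

-- ===== PORT B =====
def get_sgrna_ids_alt (frame : Int) (codon_to_sgrna_ids : List (Int × String)) (mut_pos : Int) (mut_ref : Option String) : List String :=
  let d : PySem.Dict Int String := PySem.Dict.mk codon_to_sgrna_ids
  let codon_start : Int := PySem.Int.floordiv (mut_pos + frame) 3
  let ref_length : Int := match mut_ref with
    | some s => if s = "" then 0 else PySem.Str.len s
    | none => 0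
  let codon_end : Int :=
    if ref_length ≤ 1 then codon_start
    else PySem.Int.floordiv (mut_pos + ref_length - 1 + frame) 3
  -- sorted(k for k in d if codon_start <= k <= codon_end)
  let ks : List Int := PySem.List.sorted
    ((PySem.Dict.keys d).filter (fun k => codon_start ≤ k && k ≤ codon_end)) (fun x => x)
  -- for codon_index in ks: result.add(d[codon_index]); subscript ported as get? (always hits: ks ⊆ keys)
  ks.foldl (fun acc codon_index =>
      match PySem.Dict.get? d codon_index with
      | some v => PySem.Set.add acc v
      | none => acc) PySem.Set.empty

-- ===== PRECONDITION & SPEC =====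
def Spec_get_sgrna_ids (frame : Int) (codon_to_sgrna_ids : List (Int × String)) (mut_pos : Int) (mut_ref : Option String) (out : List String) : Prop := out = get_sgrna_ids_alt frame codon_to_sgrna_ids mut_pos mut_ref
instance (frame : Int) (codon_to_sgrna_ids : List (Int × String)) (mut_pos : Int) (mut_ref : Option String) (out : List String) : Decidable (Spec_get_sgrna_ids frame codon_to_sgrna_ids mut_pos mut_ref out) := by unfold Spec_get_sgrna_ids; infer_instance

-- ===== CLAIM (what is proved, stated in full; the proofs are below) =====
def Claim_equal_get_sgrna_ids : Prop := ∀ (frame : Int) (codon_to_sgrna_ids : List (Int × String)) (mut_pos : Int) (mut_ref : Option String), Dom_get_sgrna_ids frame codon_to_sgrna_ids mut_pos mut_ref → Spec_get_sgrna_ids frame codon_to_sgrna_ids mut_pos mut_ref (get_sgrna_ids frame codon_to_sgrna_ids mut_pos mut_ref)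

-- ===== LEMMAS AND PROOFS =====

-- the shared collection step
def pvStep (d : PySem.Dict Int String) (acc : PySem.Set String) (i : Int) : PySem.Set String :=
  match PySem.Dict.get? d i with
  | some v => PySem.Set.add acc v
  | none => acc

-- folding pvStep over a nonempty run of one key i with d.get? i = some v just inserts v once
theorem pv_fold_run (d : PySem.Dict Int String) (i : Int) (v : String)
    (hv : PySem.Dict.get? d i = some v) :
    ∀ (l : List Int), (∀ k ∈ l, k = i) → ∀ (t : PySem.Set String), v ∈ t →
      l.foldl (pvStep d) t = t := by
  intro l
  induction l with
  | nil => intro _ t _; rfl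
  | cons a l ih =>
    intro hall t hvt
    have ha : a = i := hall a (by simp)
    have : pvStep d t a = t := by
      simp [pvStep, ha, hv, PySem.Set.add_of_mem hvt]
    simp only [List.foldl_cons, this]
    exact ih (fun k hk => hall k (by simp [hk])) t hvt

-- head of a dropWhile fails the predicate
theorem pv_dropWhile_head {α : Type} {p : α → Bool} {l : List α} {a : α} {t : List α}
    (h : List.dropWhile p l = a :: t) : p a = false := by
  induction l with
  | nil => simp at h
  | cons b l ih =>
    rw [List.dropWhile_cons] at h
    by_cases hb : p b = true
    · exact ih (by rwa [if_pos hb] at h)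
    · rw [if_neg hb] at h
      cases h
      simpa using hb

-- MAIN: folding over the integer range [cs, ce] equals folding over any ≤-sorted list ks
-- that contains exactly the present keys of the interval (with arbitrary multiplicity)
theorem pv_fold_range_eq (d : PySem.Dict Int String) (ce : Int) :
    ∀ (n : Nat) (cs : Int), (ce + 1 - cs).toNat = n →
    ∀ (ks : List Int) (s : PySem.Set String),
      ks.Pairwise (· ≤ ·) →
      (∀ k ∈ ks, cs ≤ k ∧ k ≤ ce ∧ (PySem.Dict.get? d k).isSome) →
      (∀ i : Int, cs ≤ i → i ≤ ce → (PySem.Dict.get? d i).isSome → i ∈ ks) →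
      (PySem.List.pyRange cs (ce + 1)).foldl (pvStep d) s = ks.foldl (pvStep d) s := by
  intro n
  induction n with
  | zero =>
    intro cs hn ks s _ hmem _
    have hce : ce < cs := by omega
    have hr : PySem.List.pyRange cs (ce + 1) = [] := by
      rw [PySem.List.pyRange_one]
      have : (ce + 1 - cs).toNat = 0 := by omega
      simp [this]
    have hks : ks = [] := by
      cases ks with
      | nil => rfl
      | cons a l =>
        have := hmem a (by simp)
        omega
    simp [hr, hks]
  | succ n ih =>
    intro cs hn ks s hsort hmem hcomp
    have hlt : cs < ce + 1 := by omega
    rw [PySem.List.pyRange_one_cons hlt, List.foldl_cons]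
    cases hget : PySem.Dict.get? d cs with
    | none =>
      have hstep : pvStep d s cs = s := by simp [pvStep, hget]
      rw [hstep]
      apply ih (cs + 1) (by omega) ks s hsort
      · intro k hk
        obtain ⟨h1, h2, h3⟩ := hmem k hk
        refine ⟨?_, h2, h3⟩
        rcases lt_or_eq_of_le h1 with h | h
        · omega
        · exfalso; rw [← h] at h3; simp [hget] at h3
      · intro i h1 h2 h3
        exact hcomp i (by omega) h2 h3
    | some v =>
      have hstep : pvStep d s cs = PySem.Set.add s v := by simp [pvStep, hget]
      rw [hstep]
      -- split ks into the leading run of cs's and the rest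
      set pre := ks.takeWhile (fun k => k == cs) with hpre
      set suf := ks.dropWhile (fun k => k == cs) with hsuf
      have hks : pre ++ suf = ks := List.takeWhile_append_dropWhile
      have hcsmem : cs ∈ ks := hcomp cs (le_refl cs) (by omega) (by simp [hget])
      have hpre_all : ∀ k ∈ pre, k = cs := by
        intro k hk
        have := List.mem_takeWhile_imp hk
        simpa using this
      have hpre_ne : pre ≠ [] := by
        intro h0
        cases hksc : ks with
        | nil => rw [hksc] at hcsmem; simp at hcsmem
        | cons a l =>
          have hha : a ≤ cs := by
            rw [hksc] at hcsmem hsort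
            rcases List.mem_cons.mp hcsmem with h | h
            · omega
            · exact (List.pairwise_cons.mp hsort).1 cs h
          have hac : cs ≤ a := (hmem a (by simp [hksc])).1
          have hacs : a = cs := by omega
          rw [hpre, hksc, List.takeWhile_cons] at h0
          simp [hacs] at h0
      have hsuf_sub : suf.Sublist ks := by rw [hsuf]; exact List.dropWhile_sublist _
      have hsuf_sort : suf.Pairwise (· ≤ ·) := hsort.sublist hsuf_sub
      have hsuf_gt : ∀ k ∈ suf, cs + 1 ≤ k := by
        intro k hk
        cases hsc : suf with
        | nil => rw [hsc] at hk; simp at hk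
        | cons a l =>
          have hane : (a == cs) = false :=
            pv_dropWhile_head (p := fun k => k == cs) (l := ks) (by rw [← hsuf]; exact hsc)
          have ha_ge : cs ≤ a := (hmem a (hsuf_sub.mem (by rw [hsc]; simp))).1
          have ha_gt : cs + 1 ≤ a := by
            have : ¬ (a = cs) := by simpa using hane
            omega
          rw [hsc] at hk hsuf_sort
          rcases List.mem_cons.mp hk with h | h
          · omega
          · have := (List.pairwise_cons.mp hsuf_sort).1 k h
            omega
      have hfold_pre : pre.foldl (pvStep d) (PySem.Set.add s v) = PySem.Set.add s v :=
        pv_fold_run d cs v hget pre hpre_all _ (by simp [PySem.Set.mem_add])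
      have hfold_ks : ks.foldl (pvStep d) s
          = suf.foldl (pvStep d) (pre.foldl (pvStep d) s) := by
        rw [← hks, List.foldl_append]
      have hfold_pre0 : pre.foldl (pvStep d) s = PySem.Set.add s v := by
        cases hpc : pre with
        | nil => exact absurd hpc hpre_ne
        | cons a l =>
          have ha : a = cs := hpre_all a (by rw [hpc]; simp)
          have : pvStep d s a = PySem.Set.add s v := by simp [pvStep, ha, hget]
          rw [List.foldl_cons, this]
          exact pv_fold_run d cs v hget l
            (fun k hk => hpre_all k (by rw [hpc]; simp [hk])) _ (by simp [PySem.Set.mem_add])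
      rw [hfold_ks, hfold_pre0]
      apply ih (cs + 1) (by omega) suf (PySem.Set.add s v) hsuf_sort
      · intro k hk
        obtain ⟨_, h2, h3⟩ := hmem k (hsuf_sub.mem hk)
        exact ⟨hsuf_gt k hk, h2, h3⟩
      · intro i h1 h2 h3
        have : i ∈ ks := hcomp i (by omega) h2 h3
        rw [← hks] at this
        rcases List.mem_append.mp this with h | h
        · exfalso; have := hpre_all i h; omega
        · exact h

-- A's index-range helper is list(range(cs, ce+1)) in every case
theorem pv_range_eq (cs ce : Int) :
    pv_get_codon_index_range cs ce = PySem.List.pyRange cs (ce + 1) := by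
  unfold pv_get_codon_index_range
  split_ifs with h
  · subst h
    rw [PySem.List.pyRange_one_cons (by omega)]
    rw [PySem.List.pyRange_one]
    simp
  · rfl

-- range fold = sorted-filtered-keys fold
theorem pv_main (d : PySem.Dict Int String) (cs ce : Int) :
    (PySem.List.pyRange cs (ce + 1)).foldl (pvStep d) PySem.Set.empty
      = (PySem.List.sorted ((PySem.Dict.keys d).filter (fun k => cs ≤ k && k ≤ ce))
          (fun x => x)).foldl (pvStep d) PySem.Set.empty := by
  apply pv_fold_range_eq d ce (ce + 1 - cs).toNat cs rfl
  · simpa using PySem.List.sorted_pairwise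
      ((PySem.Dict.keys d).filter (fun k => cs ≤ k && k ≤ ce)) (fun x => x)
  · intro k hk
    rw [PySem.List.mem_sorted] at hk
    obtain ⟨hkm, hkb⟩ := List.mem_filter.mp hk
    simp only [Bool.and_eq_true, decide_eq_true_eq] at hkb
    have hsome : (d.get? k).isSome := by
      rw [Option.isSome_iff_ne_none]
      intro hn
      exact ((PySem.Dict.get?_eq_none_iff_not_mem_keys d k).mp hn) hkm
    exact ⟨hkb.1, hkb.2, hsome⟩
  · intro i h1 h2 h3
    rw [PySem.List.mem_sorted]
    apply List.mem_filter.mpr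
    refine ⟨?_, by simp [h1, h2]⟩
    by_contra hnm
    rw [← PySem.Dict.get?_eq_none_iff_not_mem_keys] at hnm
    simp [hnm] at h3

theorem pv_final (d : PySem.Dict Int String) (cs E rl : Int) :
    (if rl > 1 then
        (pv_get_codon_index_range cs E).foldl (pvStep d) PySem.Set.empty
      else
        match PySem.Dict.get? d cs with
        | some v => PySem.Set.add PySem.Set.empty v
        | none => PySem.Set.empty)
      = (PySem.List.sorted ((PySem.Dict.keys d).filter
            (fun k => cs ≤ k && k ≤ (if rl ≤ 1 then cs else E))) (fun x => x)).foldl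
          (pvStep d) PySem.Set.empty := by
  by_cases h : rl > 1
  · rw [if_pos h, if_neg (by omega), pv_range_eq]
    exact pv_main d cs E
  · rw [if_neg h, if_pos (by omega)]
    have hsingle : (match PySem.Dict.get? d cs with
        | some v => PySem.Set.add PySem.Set.empty v
        | none => PySem.Set.empty)
        = (PySem.List.pyRange cs (cs + 1)).foldl (pvStep d) PySem.Set.empty := by
      rw [PySem.List.pyRange_one_cons (by omega), PySem.List.pyRange_one]
      simp [pvStep]
    rw [hsingle]
    exact pv_main d cs cs

-- ===== VERDICT (by name: the statement is the Claim_ definition above) =====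
theorem get_sgrna_ids_spec : Claim_equal_get_sgrna_ids := by
  intro frame codon_to_sgrna_ids mut_pos mut_ref _
  unfold Spec_get_sgrna_ids
  simp only [get_sgrna_ids, get_sgrna_ids_alt]
  have hidx : ∀ x : Int, pv_get_codon_index frame 0 x = PySem.Int.floordiv (x + frame) 3 := by
    intro x; unfold pv_get_codon_index; norm_num
  rw [hidx, hidx]
  exact pv_final _ _ _ _
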